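-- pv_equiv track=rewrite | github.com/hieudoanm/lodash | packages/py/lodash/string.py | startCase
-- ===== SOURCE A (Python) =====
-- def capitalize(string):
--   first = string[0].capitalize()
--   rest = string[1:len(string)].lower()
--   return first + rest
--
-- def startCase(string):
--   array1 = []
--   for char in string:
--     newItem = char if char.isalpha() else ' '
--     array1.append(newItem)
--   result = "".join(array1).lower().strip()
--   array2 = []
--   for word in result.split():
--     array2.append(capitalize(word))
--   return " ".join(array2)
-- ===== SOURCE B (Python) =====
-- def startCase(string):
--   words = []
--   buf = []
--   for char in string:
--     if char.isalpha():
--       buf.append(char)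
--     elif buf:
--       words.append(''.join(buf).capitalize())
--       buf = []
--   if buf:
--     words.append(''.join(buf).capitalize())
--   return ' '.join(words)
-- ===== Notes on version B (the rewrite author's own statement) =====
-- stated objective: alternative
-- what changed: Replaces A's five-stage pipeline (map non-alpha to spaces, join, lower, strip, split, capitalize each, join) with a single pass over the string that buffers each alpha run and flushes it capitalized on every non-alpha separator.
import Mathlib
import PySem

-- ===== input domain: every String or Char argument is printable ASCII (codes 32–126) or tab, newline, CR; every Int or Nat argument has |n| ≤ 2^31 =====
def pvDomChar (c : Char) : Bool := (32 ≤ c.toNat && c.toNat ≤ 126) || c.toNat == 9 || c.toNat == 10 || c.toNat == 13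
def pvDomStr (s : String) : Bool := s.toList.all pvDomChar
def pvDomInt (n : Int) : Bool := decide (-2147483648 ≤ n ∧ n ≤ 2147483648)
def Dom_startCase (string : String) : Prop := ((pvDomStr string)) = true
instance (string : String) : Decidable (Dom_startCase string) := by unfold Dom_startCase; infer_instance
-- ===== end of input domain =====

-- B replaces A's map-to-spaces/join/lower/strip/split/capitalize pipeline by one buffered scan (alternative decomposition, same cost).

-- ===== PORT A =====
-- A's helper `capitalize`: string[0].capitalize() + string[1:len(string)].lower().
-- char.capitalize() of a single character is ported as upperChar (exact on ASCII);
-- word = [] would be a Python IndexError (unreachable: split() yields nonempty words), ported as [].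
def pvCapitalizeA (word : List Char) : List Char :=
  match PySem.List.pyGet? word 0 with
  | none => []
  | some c => [PySem.Chars.upperChar c] ++
      PySem.Chars.lower (PySem.List.slice word (some 1) (some (word.length : Int)))

def startCase (string : String) : String :=
  -- for char in string: array1.append(char if char.isalpha() else ' ')
  let array1 : List (List Char) :=
    string.toList.foldl
      (fun acc char => acc ++ [if PySem.Chars.isalpha char then [char] else [' ']]) []
  -- result = "".join(array1).lower().strip()
  let result : List Char := PySem.Chars.strip (PySem.Chars.lower (PySem.Chars.join [] array1))
  -- for word in result.split(): array2.append(capitalize(word))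
  let array2 : List (List Char) :=
    (PySem.Chars.split₀ result).foldl (fun acc word => acc ++ [pvCapitalizeA word]) []
  String.mk (PySem.Chars.join [' '] array2)

-- ===== PORT B =====
-- ''.join(buf).capitalize(): upper first char, lower the rest (exact on ASCII).
def pvCapitalizeB : List Char → List Char
  | [] => []
  | c :: rest => PySem.Chars.upperChar c :: PySem.Chars.lower rest

-- one loop step of B: (words so far, current buffer)
def pvStepB (st : List (List Char) × List Char) (char : Char) : List (List Char) × List Char :=
  if PySem.Chars.isalpha char then (st.1, st.2 ++ [char])
  else if st.2.isEmpty then st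
  else (st.1 ++ [pvCapitalizeB st.2], [])

def startCase_alt (string : String) : String :=
  let st := string.toList.foldl pvStepB ([], [])
  let words := if st.2.isEmpty then st.1 else st.1 ++ [pvCapitalizeB st.2]
  String.mk (PySem.Chars.join [' '] words)

-- ===== PRECONDITION & SPEC =====
def Spec_startCase (string : String) (out : String) : Prop := out = startCase_alt string
instance (string : String) (out : String) : Decidable (Spec_startCase string out) := by unfold Spec_startCase; infer_instance

-- ===== CLAIM (what is proved, stated in full; the proofs are below) =====
def Claim_equal_startCase : Prop := ∀ (string : String), Dom_startCase string → Spec_startCase string (startCase string)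

-- ===== LEMMAS AND PROOFS =====

-- character-class arithmetic
theorem pv_upper_iff (c : Char) : PySem.Chars.isupper c = true ↔ 65 ≤ c.toNat ∧ c.toNat ≤ 90 := by
  simp only [PySem.Chars.isupper, Bool.and_eq_true, decide_eq_true_eq, Char.le_def,
    UInt32.le_iff_toNat_le, Char.toNat_val]
  constructor <;> intro h <;> exact ⟨by simpa using h.1, by simpa using h.2⟩

theorem pv_lower_iff (c : Char) : PySem.Chars.islower c = true ↔ 97 ≤ c.toNat ∧ c.toNat ≤ 122 := by
  simp only [PySem.Chars.islower, Bool.and_eq_true, decide_eq_true_eq, Char.le_def,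
    UInt32.le_iff_toNat_le, Char.toNat_val]
  constructor <;> intro h <;> exact ⟨by simpa using h.1, by simpa using h.2⟩

theorem pv_toNat_lowerChar_upper (c : Char) (h : PySem.Chars.isupper c = true) :
    (PySem.Chars.lowerChar c).toNat = c.toNat + 32 := by
  rw [pv_upper_iff c] at h
  simp only [PySem.Chars.lowerChar]
  rw [if_pos (by rw [pv_upper_iff]; omega), Char.toNat_ofNat, if_pos]
  unfold Nat.isValidChar
  omega

theorem pv_lowerChar_of_not_upper (c : Char) (h : ¬ PySem.Chars.isupper c = true) :
    PySem.Chars.lowerChar c = c := by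
  simp [PySem.Chars.lowerChar, h]

theorem pv_isspace_of_range (c : Char) (h1 : 97 ≤ c.toNat) (h2 : c.toNat ≤ 122) :
    PySem.Chars.isspace c = false := by
  simp only [PySem.Chars.isspace]
  simp only [Bool.or_eq_false_iff, Bool.and_eq_false_iff, decide_eq_false_iff_not]
  omega

theorem pv_isspace_lowerChar_of_alpha (c : Char) (h : PySem.Chars.isalpha c = true) :
    PySem.Chars.isspace (PySem.Chars.lowerChar c) = false := by
  simp only [PySem.Chars.isalpha, Bool.or_eq_true] at h
  rcases h with h | h
  · have := pv_toNat_lowerChar_upper c h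
    rw [pv_upper_iff] at h
    exact pv_isspace_of_range _ (by omega) (by omega)
  · rw [pv_lowerChar_of_not_upper c (by rw [pv_upper_iff]; rw [pv_lower_iff] at h; omega)]
    rw [pv_lower_iff] at h
    exact pv_isspace_of_range _ h.1 h.2

theorem pv_lowerChar_idem (c : Char) :
    PySem.Chars.lowerChar (PySem.Chars.lowerChar c) = PySem.Chars.lowerChar c := by
  by_cases h : PySem.Chars.isupper c = true
  · have ht := pv_toNat_lowerChar_upper c h
    apply pv_lowerChar_of_not_upper
    rw [pv_upper_iff]
    rw [pv_upper_iff] at h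
    omega
  · rw [pv_lowerChar_of_not_upper c h]
    exact pv_lowerChar_of_not_upper c h

theorem pv_upperChar_lowerChar (c : Char) :
    PySem.Chars.upperChar (PySem.Chars.lowerChar c) = PySem.Chars.upperChar c := by
  by_cases h : PySem.Chars.isupper c = true
  · have ht := pv_toNat_lowerChar_upper c h
    have hu := (pv_upper_iff c).mp h
    have hl : PySem.Chars.islower (PySem.Chars.lowerChar c) = true := by
      rw [pv_lower_iff]; omega
    have hnl : ¬ PySem.Chars.islower c = true := by rw [pv_lower_iff]; omega
    simp only [PySem.Chars.upperChar, hl, if_true, hnl]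
    rw [ht]
    simp only [Nat.add_sub_cancel]
    exact Char.ofNat_toNat c
  · rw [pv_lowerChar_of_not_upper c h]

-- the word function behind split₀ (proof helper)
def pvWords : List Char → List Char → List (List Char)
  | [], cur => if cur.isEmpty then [] else [cur.reverse]
  | c :: rest, cur =>
    if PySem.Chars.isspace c then
      (if cur.isEmpty then pvWords rest [] else cur.reverse :: pvWords rest [])
    else pvWords rest (c :: cur)

theorem pv_go_eq (s : List Char) : ∀ (cur : List Char) (acc : List (List Char)),
    PySem.Chars.split₀.go s cur acc = acc.reverse ++ pvWords s cur := by
  induction s with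
  | nil =>
    intro cur acc
    rw [PySem.Chars.split₀.go.eq_def]
    simp only [pvWords]
    split_ifs <;> simp
  | cons c rest ih =>
    intro cur acc
    rw [PySem.Chars.split₀.go.eq_def]
    simp only [pvWords]
    split_ifs with h1 h2 <;> simp [ih]

theorem pv_split₀_eq (s : List Char) : PySem.Chars.split₀ s = pvWords s [] := by
  simp [PySem.Chars.split₀, pv_go_eq]

-- split₀ ignores stripping
theorem pv_words_all_space (t : List Char) (ht : ∀ c ∈ t, PySem.Chars.isspace c = true) :
    ∀ cur, pvWords t cur = if cur.isEmpty then [] else [cur.reverse] := by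
  induction t with
  | nil => intro cur; simp [pvWords]
  | cons c t' ih =>
    intro cur
    have hc := ht c (by simp)
    have ih' := ih (fun d hd => ht d (by simp [hd]))
    simp only [pvWords, hc, if_true]
    split_ifs with h <;> simp [ih']

theorem pv_words_append_space (t : List Char) (ht : ∀ c ∈ t, PySem.Chars.isspace c = true)
    (s : List Char) : ∀ cur, pvWords (s ++ t) cur = pvWords s cur := by
  induction s with
  | nil =>
    intro cur
    simp only [List.nil_append]
    rw [pv_words_all_space t ht cur]
    simp [pvWords]
  | cons c s' ih =>
    intro cur
    simp only [List.cons_append, pvWords]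
    split_ifs <;> simp [ih]

theorem pv_words_lstrip (s : List Char) : pvWords (PySem.Chars.lstrip s) [] = pvWords s [] := by
  induction s with
  | nil => rfl
  | cons c s' ih =>
    by_cases h : PySem.Chars.isspace c = true
    · simp [PySem.Chars.lstrip, h, pvWords] at *
      exact ih
    · simp [PySem.Chars.lstrip, Bool.eq_false_iff.mpr h]

theorem pv_words_strip (s : List Char) : pvWords (PySem.Chars.strip s) [] = pvWords s [] := by
  unfold PySem.Chars.strip
  rw [← pv_words_lstrip s]
  set x := PySem.Chars.lstrip s with hx
  have hdecomp : x = PySem.Chars.rstrip x ++ (List.takeWhile PySem.Chars.isspace x.reverse).reverse := by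
    unfold PySem.Chars.rstrip
    rw [← List.reverse_append, List.takeWhile_append_dropWhile]
    simp
  conv_rhs => rw [hdecomp]
  rw [pv_words_append_space]
  intro c hc
  rw [List.mem_reverse] at hc
  exact List.mem_takeWhile_imp hc

-- capitalize agreement on a lowered word
theorem pv_capAB (b : Char) (bs : List Char) :
    pvCapitalizeA (PySem.Chars.lower (b :: bs)) = pvCapitalizeB (b :: bs) := by
  simp only [PySem.Chars.lower, List.map_cons, pvCapitalizeA, pvCapitalizeB]
  have hget : PySem.List.pyGet? (PySem.Chars.lowerChar b :: List.map PySem.Chars.lowerChar bs) (0 : Int)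
      = some (PySem.Chars.lowerChar b) := by
    simp [PySem.List.pyGet?, PySem.List.pyIdx?]
  rw [hget]
  have hsl : PySem.List.slice (PySem.Chars.lowerChar b :: List.map PySem.Chars.lowerChar bs) (some 1)
      (some ((PySem.Chars.lowerChar b :: List.map PySem.Chars.lowerChar bs).length : Int))
      = List.map PySem.Chars.lowerChar bs := by
    simp [PySem.List.slice, PySem.List.clampIdx]
    split_ifs <;> omega
  rw [hsl]
  simp [List.map_map, Function.comp_def, pv_lowerChar_idem, pv_upperChar_lowerChar]

-- A's foldl-append loops are maps
theorem pv_foldl_push {α β : Type} (h : α → β) (s : List α) : ∀ (acc : List β),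
    s.foldl (fun a c => a ++ [h c]) acc = acc ++ s.map h := by
  induction s with
  | nil => intro acc; simp
  | cons c s' ih => intro acc; simp [ih]

-- B's loop: the words component only ever grows on the right
theorem pv_foldl_ws (s : List Char) : ∀ (ws : List (List Char)) (buf : List Char),
    s.foldl pvStepB (ws, buf) =
      (ws ++ (s.foldl pvStepB ([], buf)).1, (s.foldl pvStepB ([], buf)).2) := by
  induction s with
  | nil => intro ws buf; simp
  | cons c s' ih =>
    intro ws buf
    simp only [List.foldl_cons, pvStepB]
    split_ifs with h1 h2
    · exact ih ws (buf ++ [c])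
    · exact ih ws buf
    · show List.foldl pvStepB (ws ++ [pvCapitalizeB buf], []) s' = _
      simp only [List.nil_append]
      rw [ih (ws ++ [pvCapitalizeB buf]) [], ih [pvCapitalizeB buf] []]
      simp

-- the flush of B's final state
def pvFlush (st : List (List Char) × List Char) : List (List Char) :=
  if st.2.isEmpty then st.1 else st.1 ++ [pvCapitalizeB st.2]

-- lowered separator image of a char
def pvG (c : Char) : Char :=
  PySem.Chars.lowerChar (if PySem.Chars.isalpha c then c else ' ')

theorem pv_flush_append (a l : List (List Char)) (r : List Char) :
    pvFlush (a ++ l, r) = a ++ pvFlush (l, r) := by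
  unfold pvFlush
  split_ifs <;> simp

theorem pv_main (s : List Char) : ∀ (buf : List Char),
    (pvWords (s.map pvG) ((buf.map PySem.Chars.lowerChar).reverse)).map pvCapitalizeA
      = pvFlush (s.foldl pvStepB ([], buf)) := by
  induction s with
  | nil =>
    intro buf
    cases buf with
    | nil => simp [pvWords, pvFlush]
    | cons b bs =>
      have hcap := pv_capAB b bs
      have h1 : pvWords ([] : List Char) (((b :: bs).map PySem.Chars.lowerChar).reverse)
          = [(b :: bs).map PySem.Chars.lowerChar] := by simp [pvWords]
      have h2 : pvFlush (([], b :: bs)) = [pvCapitalizeB (b :: bs)] := by simp [pvFlush]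
      rw [List.map_nil, List.foldl_nil, h1, h2]
      simp only [List.map_cons, List.map_nil]
      simpa [PySem.Chars.lower] using hcap
  | cons c s' ih =>
    intro buf
    by_cases h1 : PySem.Chars.isalpha c = true
    · have hg : pvG c = PySem.Chars.lowerChar c := by simp [pvG, h1]
      have hns := pv_isspace_lowerChar_of_alpha c h1
      simp only [List.map_cons, hg, pvWords, hns, Bool.false_eq_true, if_false,
        List.foldl_cons, pvStepB, h1, if_true]
      have hcur : (PySem.Chars.lowerChar c :: (buf.map PySem.Chars.lowerChar).reverse)
          = (((buf ++ [c]).map PySem.Chars.lowerChar).reverse) := by simp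
      rw [hcur]
      exact ih (buf ++ [c])
    · have hg : pvG c = ' ' := by simp [pvG, h1, PySem.Chars.lowerChar, PySem.Chars.isupper]
      have hs : PySem.Chars.isspace ' ' = true := by decide
      cases buf with
      | nil =>
        simp only [List.map_cons, hg, pvWords, hs, if_true, List.map_nil, List.reverse_nil,
          List.isEmpty_nil, if_true, List.foldl_cons, pvStepB, h1]
        exact ih []
      | cons b bs =>
        have hcap := pv_capAB b bs
        have hST : pvStepB (([], b :: bs)) c = ([pvCapitalizeB (b :: bs)], []) := by
          simp [pvStepB, h1]
        have h1w : pvWords (pvG c :: s'.map pvG) (((b :: bs).map PySem.Chars.lowerChar).reverse)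
            = ((b :: bs).map PySem.Chars.lowerChar) :: pvWords (s'.map pvG) [] := by
          rw [pvWords]
          simp [hg, hs]
        have ih0 := ih []
        simp only [List.map_nil, List.reverse_nil] at ih0
        rw [List.map_cons, h1w, List.map_cons, List.foldl_cons, hST,
          pv_foldl_ws s' [pvCapitalizeB (b :: bs)] []]
        rw [show ((([pvCapitalizeB (b :: bs)] ++ (List.foldl pvStepB ([], []) s').1,
              (List.foldl pvStepB ([], []) s').2)) : List (List Char) × List Char)
            = ([pvCapitalizeB (b :: bs)] ++ (List.foldl pvStepB ([], []) s').1,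
              (List.foldl pvStepB ([], []) s').2) from rfl]
        rw [pv_flush_append]
        rw [show (b :: bs).map PySem.Chars.lowerChar = PySem.Chars.lower (b :: bs) from rfl, hcap]
        rw [ih0]
        rfl

-- ===== VERDICT (by name: the statement is the Claim_ definition above) =====
theorem startCase_spec : Claim_equal_startCase := by
  unfold Claim_equal_startCase
  intro string _
  unfold Spec_startCase startCase startCase_alt
  simp only []
  rw [pv_foldl_push (fun char => if PySem.Chars.isalpha char then [char] else [' ']) _ []]
  rw [pv_foldl_push pvCapitalizeA _ []]
  simp only [List.nil_append]
  have harr1 : (string.toList.map fun char => if PySem.Chars.isalpha char then [char] else [' '])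
      = (string.toList.map (fun char => if PySem.Chars.isalpha char then char else ' ')).map (fun c => [c]) := by
    simp only [List.map_map, Function.comp_def]
    apply List.map_congr_left
    intro c _
    split_ifs <;> rfl
  rw [harr1, PySem.Chars.join_nil_singletons]
  have hlow : PySem.Chars.lower (string.toList.map (fun char => if PySem.Chars.isalpha char then char else ' '))
      = string.toList.map pvG := by
    simp [PySem.Chars.lower, List.map_map, Function.comp_def, pvG]
  rw [hlow]
  rw [pv_split₀_eq, pv_words_strip]
  have hm := pv_main string.toList []
  simp only [List.map_nil, List.reverse_nil] at hm
  rw [hm]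
  unfold pvFlush
  rfl
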